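-- pv_equiv track=rewrite | github.com/HXLLO/RegulAIte | backend/agent_framework/response_generator.py | _fix_markdown_spacing
-- ===== SOURCE A (Python) =====
-- def _fix_markdown_spacing(content: str) -> str:
--     """Fix markdown spacing issues."""
--     lines = content.split('\n')
--     fixed_lines = []
--
--     for i, line in enumerate(lines):
--         fixed_lines.append(line)
--
--         # Add spacing after headers if not already present
--         if line.startswith('#') and i < len(lines) - 1:
--             next_line = lines[i + 1] if i + 1 < len(lines) else ""
--             if next_line.strip() != "":
--                 fixed_lines.append("")  # Add empty line after header
--
--     return '\n'.join(fixed_lines)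
-- ===== SOURCE B (Python) =====
-- import re
--
-- def _fix_markdown_spacing(content: str) -> str:
--     """Fix markdown spacing issues (single regex substitution)."""
--     return re.sub(r'(?m)^(#[^\n]*)\n(?=[^\n]*\S)', r'\1\n\n', content)
-- ===== Notes on version B (the rewrite author's own statement) =====
-- stated objective: simpler
-- what changed: Replaced the index loop over split lines (with enumerate, length checks and list building) by a single multiline regex substitution that inserts the blank line after a '#' header followed by a non-blank line.
import Mathlib
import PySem

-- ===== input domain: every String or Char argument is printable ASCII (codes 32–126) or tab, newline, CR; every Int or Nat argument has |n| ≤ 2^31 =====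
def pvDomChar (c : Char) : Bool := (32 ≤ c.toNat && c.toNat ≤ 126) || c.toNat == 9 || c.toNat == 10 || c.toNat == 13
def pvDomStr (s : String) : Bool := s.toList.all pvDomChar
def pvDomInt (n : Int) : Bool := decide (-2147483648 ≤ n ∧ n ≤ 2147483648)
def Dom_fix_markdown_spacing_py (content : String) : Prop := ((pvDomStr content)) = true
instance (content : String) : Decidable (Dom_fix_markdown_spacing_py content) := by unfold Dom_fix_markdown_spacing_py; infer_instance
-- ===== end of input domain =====

-- B replaces A's index loop over split lines by one multiline regex substitution (simpler);
-- return values proved equal on every input.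

-- ===== PORT A =====
-- the body of A's `for i, line in enumerate(lines)` loop (acc = fixed_lines so far)
def pvBodyA (lines : List (List Char)) (acc : List (List Char)) (p : Int × List Char) :
    List (List Char) :=
  let acc1 := acc ++ [p.2]
  if PySem.Chars.startswith p.2 ['#'] = true ∧ p.1 < (lines.length : Int) - 1 then
    let next_line := if p.1 + 1 < (lines.length : Int) then PySem.List.pyGetD lines (p.1 + 1) [] else []
    if PySem.Chars.strip next_line ≠ [] then acc1 ++ [[]] else acc1
  else acc1

def fix_markdown_spacing_py (content : String) : String :=
  let lines := PySem.Chars.splitOn content.toList ['\n']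
  let fixed_lines := (PySem.List.enumerate lines 0).foldl (pvBodyA lines) []
  String.mk (PySem.Chars.join ['\n'] fixed_lines)

-- ===== PORT B =====
-- Hand-written, exact port of the one regex substitution
--   re.sub(r'(?m)^(#[^\n]*)\n(?=[^\n]*\S)', r'\1\n\n', content)
-- specialised to this pattern: the scan moves from line start to line start; at a line
-- starting with '#' and ending in '\n' whose following line contains a non-whitespace
-- character, the matched '<line>\n' is replaced by '<line>\n\n'; everything else is copied.
-- (`\S` = non-whitespace: exact on the printable-ASCII + tab/newline/CR domain, where
-- Python's regex whitespace class and PySem.Chars.isspace coincide.)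
def pvReSub (cs : List Char) : List Char :=
  match h : cs.span (· ≠ '\n') with
  | (line, []) => line
  | (line, c :: tail) =>
    if line.head? = some '#' ∧ (tail.takeWhile (· ≠ '\n')).any (fun c => !PySem.Chars.isspace c) = true then
      line ++ '\n' :: '\n' :: pvReSub tail
    else
      line ++ '\n' :: pvReSub tail
termination_by cs.length
decreasing_by
  all_goals
    have h1 : cs.dropWhile (· ≠ '\n') = c :: tail := by
      simpa [List.span_eq_takeWhile_dropWhile] using congrArg Prod.snd h
    have h2 := List.takeWhile_append_dropWhile (l := cs) (p := (· ≠ '\n'))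
    rw [h1] at h2
    have := congrArg List.length h2
    simp at this
    omega

def fix_markdown_spacing_py_alt (content : String) : String :=
  String.mk (pvReSub content.toList)

-- ===== PRECONDITION & SPEC =====
def Spec_fix_markdown_spacing_py (content : String) (out : String) : Prop := out = fix_markdown_spacing_py_alt content
instance (content : String) (out : String) : Decidable (Spec_fix_markdown_spacing_py content out) := by unfold Spec_fix_markdown_spacing_py; infer_instance

-- ===== CLAIM (what is proved, stated in full; the proofs are below) =====
def Claim_equal_fix_markdown_spacing_py : Prop := ∀ (content : String), Dom_fix_markdown_spacing_py content → Spec_fix_markdown_spacing_py content (fix_markdown_spacing_py content)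

-- ===== LEMMAS AND PROOFS =====

-- structural version of content.split('\n')
def pvLines : List Char → List (List Char)
  | [] => [[]]
  | c :: rest =>
    if c = '\n' then [] :: pvLines rest
    else
      match pvLines rest with
      | [] => [[c]]
      | l :: ls => (c :: l) :: ls

-- structural version of A's loop on the list of lines
def pvFix : List (List Char) → List (List Char)
  | [] => []
  | [l] => [l]
  | l :: l' :: rest =>
    if PySem.Chars.startswith l ['#'] = true ∧ PySem.Chars.strip l' ≠ [] then
      l :: [] :: pvFix (l' :: rest)
    else l :: pvFix (l' :: rest)

lemma pvLines_ne_nil (cs : List Char) : pvLines cs ≠ [] := by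
  match cs with
  | [] => simp [pvLines]
  | c :: rest =>
    rw [pvLines]
    split
    · simp
    · split <;> simp

lemma pvLines_no_nl (line : List Char) (h : '\n' ∉ line) : pvLines line = [line] := by
  induction line with
  | nil => rfl
  | cons c rest ih =>
    simp at h
    rw [pvLines, if_neg (fun hc => h.1 hc.symm), ih h.2]

lemma pvLines_append (line tail : List Char) (h : '\n' ∉ line) :
    pvLines (line ++ '\n' :: tail) = line :: pvLines tail := by
  induction line with
  | nil => simp [pvLines]
  | cons c rest ih =>
    simp at h
    rw [List.cons_append, pvLines, if_neg (fun hc => h.1 hc.symm), ih h.2]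

lemma pvLines_head (cs : List Char) :
    (pvLines cs).head? = some (cs.takeWhile (· ≠ '\n')) := by
  induction cs with
  | nil => rfl
  | cons c rest ih =>
    rw [pvLines]
    by_cases hc : c = '\n'
    · simp [hc, List.takeWhile]
    · rw [if_neg hc]
      rcases hl : pvLines rest with _ | ⟨l, ls⟩
      · exact absurd hl (pvLines_ne_nil rest)
      · rw [hl] at ih
        simp at ih
        simp [List.takeWhile, hc, ih]

lemma pvSplitOn_go_inv (cs : List Char) : ∀ (fuel : Nat) (cur : List Char) (acc : List (List Char)),
    cs.length ≤ fuel →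
    PySem.Chars.splitOn.go ['\n'] fuel cs cur acc =
      acc.reverse ++ (match pvLines cs with
                      | [] => [cur.reverse]
                      | l :: ls => (cur.reverse ++ l) :: ls) := by
  induction cs with
  | nil =>
    intro fuel cur acc _
    cases fuel with
    | zero => rw [PySem.Chars.splitOn.go]; simp [pvLines]
    | succ f => rw [PySem.Chars.splitOn.go] <;> simp [pvLines]
  | cons c rest ih =>
    intro fuel cur acc hf
    cases fuel with
    | zero => simp at hf
    | succ f =>
      rw [PySem.Chars.splitOn.go]
      · by_cases hc : c = '\n'
        · rw [if_pos (by simp [List.isPrefixOf, hc])]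
          simp only [List.length_cons, List.length_nil, List.drop_succ_cons, List.drop_zero]
          rw [ih f [] (cur.reverse :: acc) (by simp at hf ⊢; omega)]
          rcases hl : pvLines rest with _ | ⟨l, ls⟩
          · exact absurd hl (pvLines_ne_nil rest)
          · simp [pvLines, hc, hl]
        · rw [if_neg (by simp [List.isPrefixOf]; exact fun h => hc h.symm)]
          rw [ih f (c :: cur) acc (by simp at hf ⊢; omega)]
          rcases hl : pvLines rest with _ | ⟨l, ls⟩
          · exact absurd hl (pvLines_ne_nil rest)
          · simp [pvLines, hc, hl]

lemma pvSplitOn_eq (cs : List Char) : PySem.Chars.splitOn cs ['\n'] = pvLines cs := by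
  rw [PySem.Chars.splitOn, pvSplitOn_go_inv cs (cs.length + 1) [] [] (by omega)]
  rcases hl : pvLines cs with _ | ⟨l, ls⟩
  · exact absurd hl (pvLines_ne_nil cs)
  · simp

lemma pvFoldA (lines : List (List Char)) :
    ∀ (suf pre acc : List (List Char)), lines = pre ++ suf →
    (PySem.List.enumerate suf (pre.length : Int)).foldl (pvBodyA lines) acc = acc ++ pvFix suf := by
  intro suf
  induction suf with
  | nil => intro pre acc _; simp [PySem.List.enumerate_nil, pvFix]
  | cons l suf' ih =>
    intro pre acc hpre
    rw [PySem.List.enumerate_cons, List.foldl_cons]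
    match suf' with
    | [] =>
      have hb : pvBodyA lines acc ((pre.length : Int), l) = acc ++ [l] := by
        unfold pvBodyA
        rw [if_neg]
        rintro ⟨-, hlt⟩
        rw [hpre] at hlt
        simp at hlt
      rw [hb, PySem.List.enumerate_nil, List.foldl_nil]
      rfl
    | l' :: rest =>
      have hlen : lines.length = pre.length + 2 + rest.length := by simp [hpre]; omega
      have hnext : PySem.List.pyGetD lines ((pre.length : Int) + 1) [] = l' := by
        have : ((pre.length : Int) + 1) = ((pre.length + 1 : Nat) : Int) := by push_cast; ring
        rw [this, PySem.List.pyGetD_natCast, hpre]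
        rw [List.getD_eq_getElem?_getD, List.getElem?_append_right (by omega)]
        simp
      have hb : pvBodyA lines acc ((pre.length : Int), l) =
          if PySem.Chars.startswith l ['#'] = true ∧ PySem.Chars.strip l' ≠ [] then
            acc ++ [l] ++ [[]] else acc ++ [l] := by
        unfold pvBodyA
        by_cases hs : PySem.Chars.startswith l ['#'] = true
        · have hcond : ((pre.length : Int)) < (lines.length : Int) - 1 := by
            rw [hlen]; push_cast; omega
          have hcond2 : ((pre.length : Int)) + 1 < (lines.length : Int) := by
            rw [hlen]; push_cast; omega
          rw [if_pos ⟨hs, hcond⟩]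
          simp only
          rw [if_pos hcond2, hnext]
          by_cases hst : PySem.Chars.strip l' ≠ []
          · rw [if_pos hst, if_pos ⟨hs, hst⟩]
          · rw [if_neg hst, if_neg (by tauto)]
        · rw [if_neg (by tauto), if_neg (by tauto)]
      have hih := ih (pre ++ [l]) (pvBodyA lines acc ((pre.length : Int), l)) (by simp [hpre])
      simp only [List.length_append, List.length_cons, List.length_nil] at hih
      have hcast : ((pre.length + (0 + 1) : Nat) : Int) = (pre.length : Int) + 1 := by push_cast; ring
      rw [hcast] at hih
      rw [hih, hb]
      by_cases hc : PySem.Chars.startswith l ['#'] = true ∧ PySem.Chars.strip l' ≠ []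
      · rw [if_pos hc, show pvFix (l :: l' :: rest) = l :: [] :: pvFix (l' :: rest) by
          rw [pvFix, if_pos hc]]
        simp
      · rw [if_neg hc, show pvFix (l :: l' :: rest) = l :: pvFix (l' :: rest) by
          rw [pvFix, if_neg hc]]
        simp

lemma pvStartswith_hash (l : List Char) :
    PySem.Chars.startswith l ['#'] = true ↔ l.head? = some '#' := by
  cases l with
  | nil => simp [PySem.Chars.startswith, List.isPrefixOf]
  | cons c cs =>
    simp [PySem.Chars.startswith, List.isPrefixOf]
    exact eq_comm

lemma pvStrip_eq_nil_iff (l : List Char) :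
    PySem.Chars.strip l = [] ↔ ∀ x ∈ l, PySem.Chars.isspace x = true := by
  rw [PySem.Chars.strip, PySem.Chars.rstrip, PySem.Chars.lstrip]
  simp only [List.reverse_eq_nil_iff, List.dropWhile_eq_nil_iff, List.mem_reverse]
  constructor
  · intro hall x hx
    rw [← List.takeWhile_append_dropWhile (p := PySem.Chars.isspace) (l := l)] at hx
    rcases List.mem_append.1 hx with h | h
    · exact List.mem_takeWhile_imp h
    · exact hall x h
  · intro hall x hx
    exact hall x ((List.dropWhile_sublist _).subset hx)

lemma pvStrip_ne_nil_iff (l : List Char) :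
    PySem.Chars.strip l ≠ [] ↔ l.any (fun c => !PySem.Chars.isspace c) = true := by
  rw [Ne, pvStrip_eq_nil_iff]
  simp

lemma pvDropWhile_head : ∀ (l : List Char) (c : Char) (t : List Char),
    l.dropWhile (· ≠ '\n') = c :: t → c = '\n'
  | [], c, t => by simp
  | a :: l', c, t => by
    rw [List.dropWhile_cons]
    split
    · exact pvDropWhile_head l' c t
    · rename_i ha
      intro h
      obtain ⟨rfl, -⟩ := List.cons.injEq .. ▸ h
      simpa using ha

lemma pvFix_ne_nil (l : List (List Char)) (h : l ≠ []) : pvFix l ≠ [] := by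
  match l with
  | [x] => simp [pvFix]
  | x :: y :: rest =>
    rw [pvFix]
    split <;> simp

lemma pvSpanFacts (cs line : List Char) (c : Char) (tail : List Char)
    (h : cs.span (· ≠ '\n') = (line, c :: tail)) :
    cs.takeWhile (· ≠ '\n') = line ∧ cs.dropWhile (· ≠ '\n') = c :: tail ∧ c = '\n' ∧
      cs = line ++ '\n' :: tail ∧ '\n' ∉ line := by
  have ht : cs.takeWhile (· ≠ '\n') = line := by
    simpa [List.span_eq_takeWhile_dropWhile] using congrArg Prod.fst h
  have hd : cs.dropWhile (· ≠ '\n') = c :: tail := by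
    simpa [List.span_eq_takeWhile_dropWhile] using congrArg Prod.snd h
  have hc : c = '\n' := pvDropWhile_head cs c tail hd
  refine ⟨ht, hd, hc, ?_, ?_⟩
  · conv_lhs => rw [← List.takeWhile_append_dropWhile (p := (· ≠ '\n')) (l := cs)]
    rw [ht, hd, hc]
  · intro hm
    have := List.mem_takeWhile_imp (ht ▸ hm)
    simp at this

lemma pvMain (cs : List Char) :
    PySem.Chars.join ['\n'] (pvFix (pvLines cs)) = pvReSub cs := by
  induction cs using pvReSub.induct with
  | case1 cs line h =>
    have ht : cs.takeWhile (· ≠ '\n') = line := by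
      simpa [List.span_eq_takeWhile_dropWhile] using congrArg Prod.fst h
    have hd : cs.dropWhile (· ≠ '\n') = [] := by
      simpa [List.span_eq_takeWhile_dropWhile] using congrArg Prod.snd h
    have hcs : cs = line := by
      conv_lhs => rw [← List.takeWhile_append_dropWhile (p := (· ≠ '\n')) (l := cs)]
      rw [ht, hd, List.append_nil]
    have hnl : '\n' ∉ line := by
      intro hm
      have := List.mem_takeWhile_imp (ht ▸ hm)
      simp at this
    rw [pvReSub, h, hcs, pvLines_no_nl line hnl]
    simp [pvFix, PySem.Chars.join_singleton]
  | case2 cs line c tail h hcond ih =>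
    obtain ⟨ht, hd, hc, hcs, hnl⟩ := pvSpanFacts cs line c tail h
    subst hc
    rw [pvReSub, h]
    dsimp only
    rw [if_pos hcond, hcs, pvLines_append _ _ hnl]
    rcases hl : pvLines tail with _ | ⟨t1, ts⟩
    · exact absurd hl (pvLines_ne_nil tail)
    · have ht1 : t1 = tail.takeWhile (· ≠ '\n') := by
        have := pvLines_head tail
        rw [hl] at this
        simpa using this
      have hA : PySem.Chars.startswith line ['#'] = true ∧ PySem.Chars.strip t1 ≠ [] := by
        refine ⟨(pvStartswith_hash line).2 hcond.1, (pvStrip_ne_nil_iff t1).2 ?_⟩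
        rw [ht1]
        exact hcond.2
      rw [pvFix, if_pos hA]
      rcases hp : pvFix (t1 :: ts) with _ | ⟨p, ps⟩
      · exact absurd hp (pvFix_ne_nil _ (by simp))
      · rw [hl, hp] at ih
        rw [PySem.Chars.join_cons_cons, PySem.Chars.join_cons_cons, ih]
        simp
  | case3 cs line c tail h hcond ih =>
    obtain ⟨ht, hd, hc, hcs, hnl⟩ := pvSpanFacts cs line c tail h
    subst hc
    rw [pvReSub, h]
    dsimp only
    rw [if_neg hcond, hcs, pvLines_append _ _ hnl]
    rcases hl : pvLines tail with _ | ⟨t1, ts⟩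
    · exact absurd hl (pvLines_ne_nil tail)
    · have ht1 : t1 = tail.takeWhile (· ≠ '\n') := by
        have := pvLines_head tail
        rw [hl] at this
        simpa using this
      have hA : ¬ (PySem.Chars.startswith line ['#'] = true ∧ PySem.Chars.strip t1 ≠ []) := by
        rintro ⟨h1, h2⟩
        exact hcond ⟨(pvStartswith_hash line).1 h1, ht1 ▸ (pvStrip_ne_nil_iff t1).1 h2⟩
      rw [pvFix, if_neg hA]
      rcases hp : pvFix (t1 :: ts) with _ | ⟨p, ps⟩
      · exact absurd hp (pvFix_ne_nil _ (by simp))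
      · rw [hl, hp] at ih
        rw [PySem.Chars.join_cons_cons, ih]
        simp

-- ===== VERDICT (by name: the statement is the Claim_ definition above) =====
theorem fix_markdown_spacing_py_spec : Claim_equal_fix_markdown_spacing_py := by
  intro content _
  unfold Spec_fix_markdown_spacing_py fix_markdown_spacing_py fix_markdown_spacing_py_alt
  rw [pvSplitOn_eq]
  have h := pvFoldA (pvLines content.toList) (pvLines content.toList) [] [] (by simp)
  simp only [List.length_nil, Nat.cast_zero, List.nil_append] at h
  show String.mk (PySem.Chars.join ['\n'] (List.foldl (pvBodyA (pvLines content.toList)) []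
      (PySem.List.enumerate (pvLines content.toList) 0))) = String.mk (pvReSub content.toList)
  rw [h, pvMain]
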